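-- pv_equiv track=rewrite | github.com/hexan86/Lucipher | Lucipher.py | decode
-- ===== SOURCE A (Python) =====
-- def get_sirn(text):
--     # Calculate the Static Initial Rotation Number
--     return len(text)
--
-- def decode(text):
--     # Decode: use the SIRN to shift back the text
--     sirn = get_sirn(text)
--     irn = sirn
--     decoded_text = []
--     word_count = 0
--
--     for i, char in enumerate(text):
--         if char == ' ':
--             word_count += 1
--             irn = sirn + word_count  # Increment IRN for the next word
--             decoded_text.append(char)
--         elif char.isalpha():
--             shift = -(irn + (i - sum(1 for c in text[:i] if c == ' ')))  # Calculate shift based on position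
--             decoded_char = chr((ord(char) - ord('A') + shift) % 26 + ord('A')) if char.isupper() else \
--                            chr((ord(char) - ord('a') + shift) % 26 + ord('a'))
--             decoded_text.append(decoded_char)
--         else:
--             decoded_text.append(char)  # Non-alphabetic characters remain unchanged
--
--     return ''.join(decoded_text)
-- ===== SOURCE B (Python) =====
-- def decode(text):
--     # O(n): running counters replace A's per-character prefix rescan.
--     n = len(text)
--     out = []
--     words = 0    # spaces seen so far
--     letters = 0  # non-space characters seen so far
--     for ch in text:
--         if ch == ' ':
--             words += 1
--             out.append(ch)
--         else:
--             if ch.isalpha():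
--                 base = ord('A') if ch.isupper() else ord('a')
--                 out.append(chr((ord(ch) - base - (n + words + letters)) % 26 + base))
--             else:
--                 out.append(ch)
--             letters += 1
--     return ''.join(out)
-- ===== Notes on version B (the rewrite author's own statement) =====
-- stated objective: faster
-- what changed: B keeps running counts of spaces and non-space characters seen so far, so A's per-character rescan of the whole prefix (sum over text[:i]) disappears and the index/irn variables are replaced by a single closed-form shift n+words+letters.
import Mathlib
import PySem

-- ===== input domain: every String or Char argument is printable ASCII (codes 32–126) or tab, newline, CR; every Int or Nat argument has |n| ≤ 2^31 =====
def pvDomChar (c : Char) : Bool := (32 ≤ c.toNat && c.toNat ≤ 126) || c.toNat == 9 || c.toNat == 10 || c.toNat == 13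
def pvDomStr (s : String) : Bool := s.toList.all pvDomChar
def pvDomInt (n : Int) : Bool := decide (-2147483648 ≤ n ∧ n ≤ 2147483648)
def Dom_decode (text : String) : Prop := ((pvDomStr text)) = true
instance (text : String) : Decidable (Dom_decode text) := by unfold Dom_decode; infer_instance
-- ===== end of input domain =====

-- B replaces A's per-character rescan of text[:i] with running space/non-space counters (O(n^2) -> O(n)); return value only.
-- ===== PORT A =====
-- A: for each char, rescans text[:i] to count spaces; state (irn, word_count, acc).
def decodeShiftChar (c : Char) (shift : Int) : Char :=
  if PySem.Str.isupper c then
    Char.ofNat (PySem.Int.mod ((c.toNat : Int) - 65 + shift) 26 + 65).toNat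
  else
    Char.ofNat (PySem.Int.mod ((c.toNat : Int) - 97 + shift) 26 + 97).toNat

def decodeStepA (sirn : Int) (cs : List Char)
    (st : Int × Int × List Char) (p : Int × Char) : Int × Int × List Char :=
  let irn := st.1; let wc := st.2.1; let acc := st.2.2
  let i := p.1; let c := p.2
  if c = ' ' then
    (sirn + (wc + 1), wc + 1, acc ++ [c])
  else if PySem.Str.isalpha c then
    let spaces : Int := ((PySem.List.slice cs none (some i)).count ' ' : Nat)
    let shift : Int := -(irn + (i - spaces))
    (irn, wc, acc ++ [decodeShiftChar c shift])
  else
    (irn, wc, acc ++ [c])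

def decode (text : String) : String :=
  let cs := text.toList
  let sirn : Int := cs.length
  let st := (PySem.List.enumerate cs 0).foldl (decodeStepA sirn cs) (sirn, 0, [])
  String.ofList st.2.2

-- ===== PORT B =====
-- B: one pass with running counters 'words' (spaces so far) and 'letters' (non-spaces so far).
def decodeStepB (n : Int) (st : Int × Int × List Char) (c : Char) : Int × Int × List Char :=
  let words := st.1; let letters := st.2.1; let acc := st.2.2
  if c = ' ' then
    (words + 1, letters, acc ++ [c])
  else if PySem.Str.isalpha c then
    (words, letters + 1, acc ++ [decodeShiftChar c (-(n + words + letters))])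
  else
    (words, letters + 1, acc ++ [c])

def decode_alt (text : String) : String :=
  let cs := text.toList
  let n : Int := cs.length
  let st := cs.foldl (decodeStepB n) (0, 0, [])
  String.ofList st.2.2

-- ===== PRECONDITION & SPEC =====
def Spec_decode (text : String) (out : String) : Prop := out = decode_alt text
instance (text : String) (out : String) : Decidable (Spec_decode text out) := by unfold Spec_decode; infer_instance

-- ===== CLAIM (what is proved, stated in full; the proofs are below) =====
def Claim_equal_decode : Prop := ∀ (text : String), Dom_decode text → Spec_decode text (decode text)

-- ===== LEMMAS AND PROOFS =====

-- Loop invariant: after processing prefix xs (wc spaces among them), A's state is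
-- (sirn + wc, wc, acc) and B's is (wc, |xs| - wc, acc); both folds over the suffix agree.
lemma decode_loop (cs : List Char) : ∀ (ys xs : List Char) (acc : List Char),
    cs = xs ++ ys →
    ((PySem.List.enumerate ys (xs.length : Int)).foldl (decodeStepA (cs.length : Int) cs)
      ((cs.length : Int) + (xs.count ' ' : Nat), ((xs.count ' ' : Nat) : Int), acc)).2.2
    = (ys.foldl (decodeStepB (cs.length : Int))
      (((xs.count ' ' : Nat) : Int), ((xs.length : Int) - (xs.count ' ' : Nat)), acc)).2.2 := by
  intro ys
  induction ys with
  | nil =>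
      intro xs acc h
      simp [PySem.List.enumerate_nil]
  | cons c ys ih =>
      intro xs acc h
      have hsp : xs.count ' ' ≤ xs.length := List.count_le_length
      rw [PySem.List.enumerate_cons]
      simp only [List.foldl_cons]
      have hpre : PySem.List.slice cs none (some ((xs.length : Nat) : Int)) = xs := by
        rw [PySem.List.slice_to_natCast, h, List.take_left]
      by_cases hc : c = ' '
      · subst hc
        have h' : cs = (xs ++ [' ']) ++ ys := by simpa using h
        have := ih (xs ++ [' ']) (acc ++ [' ']) h'
        simp only [decodeStepA, decodeStepB]
        simp only [List.count_append, List.length_append, List.count_cons, List.count_nil,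
          List.length_cons, List.length_nil] at this
        norm_num at this ⊢
        convert this using 3
      · have h' : cs = (xs ++ [c]) ++ ys := by simpa using h
        by_cases ha : PySem.Str.isalpha c = true
        · have := ih (xs ++ [c]) (acc ++ [decodeShiftChar c
            (-((cs.length : Int) + ((xs.count ' ' : Nat) : Int) +
               (((xs.length : Nat) : Int) - ((xs.count ' ' : Nat) : Int))))]) h'
          simp only [List.count_append, List.length_append, List.count_cons, List.count_nil,
            List.length_cons, List.length_nil, beq_iff_eq, if_neg hc] at this
          simp only [decodeStepA, decodeStepB, if_neg hc, if_pos ha, hpre]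
          norm_num at this ⊢
          ring_nf at this ⊢
          exact this
        · have := ih (xs ++ [c]) (acc ++ [c]) h'
          simp only [List.count_append, List.length_append, List.count_cons, List.count_nil,
            List.length_cons, List.length_nil, beq_iff_eq, if_neg hc] at this
          simp only [decodeStepA, decodeStepB, if_neg hc, if_neg ha]
          norm_num at this ⊢
          convert this using 3
          ring

-- ===== VERDICT (by name: the statement is the Claim_ definition above) =====
theorem decode_spec : Claim_equal_decode := by
  intro text _
  unfold Spec_decode decode decode_alt
  have h := decode_loop text.toList text.toList [] [] (by simp)
  simp only [List.count_nil, List.length_nil, Nat.cast_zero, sub_self, add_zero] at h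
  exact congrArg String.ofList h
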